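-- pv_equiv track=rewrite | github.com/colverz/Geant4-Agent | tools/evaluate_guard_casebanks.py | _duplicate_ids
-- ===== SOURCE A (Python) =====
-- from typing import Any
--
-- def _duplicate_ids(items: list[dict[str, Any]]) -> list[str]:
--     seen: set[str] = set()
--     duplicates: set[str] = set()
--     for item in items:
--         item_id = str(item.get("id", ""))
--         if item_id in seen:
--             duplicates.add(item_id)
--         seen.add(item_id)
--     return sorted(duplicates)
-- ===== SOURCE B (Python) =====
-- from typing import Any
--
-- def _duplicate_ids(items: list[dict[str, Any]]) -> list[str]:
--     # Sort all extracted ids first, then scan runs of equal neighbours: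
--     # the head of every run of length >= 2 is a duplicate, already in order.
--     ids = sorted(str(item.get("id", "")) for item in items)
--     out: list[str] = []
--     i = 0
--     n = len(ids)
--     while i < n:
--         j = i + 1
--         while j < n and ids[j] == ids[i]:
--             j += 1
--         if j > i + 1:
--             out.append(ids[i])
--         i = j
--     return out
-- ===== Notes on version B (the rewrite author's own statement) =====
-- stated objective: alternative
-- what changed: B sorts the full multiset of extracted ids up front and then collects the heads of runs of equal neighbours of length >= 2 (sort-then-adjacent-scan), instead of A's single pass with seen/duplicates membership sets followed by a sort of the duplicate set.
import Mathlib
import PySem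

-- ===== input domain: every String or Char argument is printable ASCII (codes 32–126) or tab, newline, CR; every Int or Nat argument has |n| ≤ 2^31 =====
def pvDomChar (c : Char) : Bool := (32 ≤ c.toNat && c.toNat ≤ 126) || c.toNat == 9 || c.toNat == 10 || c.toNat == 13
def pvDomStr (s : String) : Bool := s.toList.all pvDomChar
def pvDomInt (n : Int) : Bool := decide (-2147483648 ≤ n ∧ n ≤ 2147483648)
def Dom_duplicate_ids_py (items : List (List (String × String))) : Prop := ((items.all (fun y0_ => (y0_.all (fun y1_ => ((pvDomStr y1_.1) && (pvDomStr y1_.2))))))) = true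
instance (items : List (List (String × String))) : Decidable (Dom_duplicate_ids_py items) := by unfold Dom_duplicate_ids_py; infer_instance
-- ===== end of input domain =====

-- B sorts all extracted ids up front and collects the heads of runs of equal
-- neighbours of length >= 2 (sort-then-adjacent-scan); same return value as A.

-- ===== PORT A =====
def duplicate_ids_py (items : List (List (String × String))) : List String :=
  let st := items.foldl
    (fun (st : PySem.Set String × PySem.Set String) item =>
      let item_id := (PySem.Dict.mk item).getD "id" ""
      let duplicates := if PySem.Set.contains st.1 item_id then PySem.Set.add st.2 item_id else st.2
      (PySem.Set.add st.1 item_id, duplicates))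
    (PySem.Set.empty, PySem.Set.empty)
  PySem.List.sorted st.2 (fun x => x) false

-- ===== PORT B =====
-- run scan over the sorted ids: Source B's outer while loop, one call per run;
-- the inner while (advance j over equal neighbours) is the dropWhile.
def pvRunScan : List String → List String
  | [] => []
  | a :: t =>
    if t.head? = some a then a :: pvRunScan (t.dropWhile (fun y => y == a))
    else pvRunScan t
termination_by l => l.length
decreasing_by
  · simpa using Nat.lt_succ_of_le (List.length_dropWhile_le _ _)
  · simp

def duplicate_ids_py_alt (items : List (List (String × String))) : List String :=
  let ids := PySem.List.sorted (items.map (fun item => (PySem.Dict.mk item).getD "id" "")) (fun x => x) false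
  pvRunScan ids

-- ===== PRECONDITION & SPEC =====
def Spec_duplicate_ids_py (items : List (List (String × String))) (out : List String) : Prop := out = duplicate_ids_py_alt items
instance (items : List (List (String × String))) (out : List String) : Decidable (Spec_duplicate_ids_py items out) := by unfold Spec_duplicate_ids_py; infer_instance

-- ===== CLAIM (what is proved, stated in full; the proofs are below) =====
def Claim_equal_duplicate_ids_py : Prop := ∀ (items : List (List (String × String))), Dom_duplicate_ids_py items → Spec_duplicate_ids_py items (duplicate_ids_py items)

-- ===== LEMMAS AND PROOFS =====

-- A's loop body, named for the fold lemmas.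
def pvStep (st : PySem.Set String × PySem.Set String) (x : String) :
    PySem.Set String × PySem.Set String :=
  (PySem.Set.add st.1 x, if PySem.Set.contains st.1 x then PySem.Set.add st.2 x else st.2)

theorem pvLoop_snd_mem (l : List String) (s d : PySem.Set String) (x : String) :
    x ∈ (l.foldl pvStep (s, d)).2 ↔ x ∈ d ∨ (x ∈ s ∧ x ∈ l) ∨ 2 ≤ l.count x := by
  induction l generalizing s d with
  | nil => simp
  | cons a t ih =>
    simp only [List.foldl_cons]
    rw [show pvStep (s, d) a
        = (PySem.Set.add s a, if PySem.Set.contains s a then PySem.Set.add d a else d) from rfl]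
    rw [ih]
    have hcs : (PySem.Set.contains s a = true) ↔ a ∈ s := by
      simp [PySem.Set.contains]
    by_cases hs : a ∈ s
    · rw [if_pos (hcs.mpr hs)]
      by_cases hxa : x = a <;> by_cases hxs : x ∈ s <;> by_cases ht : x ∈ t <;> by_cases hd : x ∈ d <;>
        (try subst hxa) <;>
        (first
          | (have h1 : 0 < t.count x := List.count_pos_iff.mpr ht
             simp_all [PySem.Set.mem_add, List.count_cons, eq_comm]) <;> omega
          | (have h1 : t.count x = 0 := List.count_eq_zero.mpr ht
             simp_all [PySem.Set.mem_add, List.count_cons, eq_comm]) <;> omega)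
    · rw [if_neg (fun hh => hs (hcs.mp hh))]
      by_cases hxa : x = a <;> by_cases hxs : x ∈ s <;> by_cases ht : x ∈ t <;> by_cases hd : x ∈ d <;>
        (try subst hxa) <;>
        (first
          | (have h1 : 0 < t.count x := List.count_pos_iff.mpr ht
             simp_all [PySem.Set.mem_add, List.count_cons, eq_comm]) <;> omega
          | (have h1 : t.count x = 0 := List.count_eq_zero.mpr ht
             simp_all [PySem.Set.mem_add, List.count_cons, eq_comm]) <;> omega)

theorem pvLoop_snd_nodup (l : List String) (s d : PySem.Set String) (hd : d.Nodup) :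
    (l.foldl pvStep (s, d)).2.Nodup := by
  induction l generalizing s d with
  | nil => exact hd
  | cons a t ih =>
    simp only [List.foldl_cons]
    rw [show pvStep (s, d) a
        = (PySem.Set.add s a, if PySem.Set.contains s a then PySem.Set.add d a else d) from rfl]
    apply ih
    split_ifs
    · exact PySem.Set.nodup_add _ _ hd
    · exact hd

-- pvRunScan is a sublist of its argument.
theorem pvRunScan_sublist (l : List String) : (pvRunScan l).Sublist l := by
  induction l using pvRunScan.induct with
  | case1 => simp [pvRunScan]
  | case2 a t h ih =>
    rw [pvRunScan, if_pos h]
    exact (ih.trans (List.dropWhile_sublist _)).cons₂ a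
  | case3 a t h ih =>
    rw [pvRunScan, if_neg h]
    exact ih.cons a

-- In a ≤-sorted list, the head does not occur in the dropWhile tail.
theorem pv_head_not_mem_drop (a : String) (t : List String)
    (hp : (a :: t).Pairwise (· ≤ ·)) : a ∉ t.dropWhile (fun y => y == a) := by
  intro hmem
  have hle : ∀ y ∈ t, a ≤ y := fun y hy => (List.pairwise_cons.mp hp).1 y hy
  have hrest : (t.dropWhile (fun y => y == a)).Pairwise (· ≤ ·) :=
    List.Pairwise.sublist (List.dropWhile_sublist _) ((List.pairwise_cons.mp hp).2)
  match hH : t.dropWhile (fun y => y == a) with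
  | [] => simp [hH] at hmem
  | b :: r =>
    have hbne : ¬ (b == a) = true := by
      have := List.head?_dropWhile_not (fun y => y == a) t
      simp [hH] at this; simpa using this
    have hba : b ≠ a := by simpa using hbne
    rw [hH] at hmem hrest
    have hab : a ≤ b := hle b ((List.dropWhile_sublist _).subset (by rw [hH]; simp))
    rcases List.mem_cons.mp hmem with h | h
    · exact hba h.symm
    · have hba2 : b ≤ a := (List.pairwise_cons.mp hrest).1 a h
      exact hba (le_antisymm hba2 hab)

-- If the head is not repeated next, it does not occur in the tail (sorted list).
theorem pv_head_not_mem_tail (a : String) (t : List String)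
    (hp : (a :: t).Pairwise (· ≤ ·)) (h : ¬ t.head? = some a) : a ∉ t := by
  intro hmem
  match t, hmem with
  | b :: r, hmem =>
    have hab : a ≤ b := (List.pairwise_cons.mp hp).1 b (by simp)
    have hba : b ≠ a := by intro e; exact h (by simp [e])
    rcases List.mem_cons.mp hmem with he | he
    · exact hba he.symm
    · have : b ≤ a := (List.pairwise_cons.mp (List.pairwise_cons.mp hp).2).1 a he
      exact hba (le_antisymm this hab)

-- counts through a run split: t = takeWhile(==a) ++ dropWhile(==a)
theorem pv_count_drop (a x : String) (t : List String) (hx : x ≠ a) :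
    (t.dropWhile (fun y => y == a)).count x = t.count x := by
  conv_rhs => rw [← List.takeWhile_append_dropWhile (p := fun y => y == a) (l := t)]
  rw [List.count_append]
  have : (t.takeWhile (fun y => y == a)).count x = 0 := by
    apply List.count_eq_zero.mpr
    intro hmem
    have := List.mem_takeWhile_imp hmem
    simp at this; exact hx this
  omega

-- membership characterisation of the run scan on a sorted list
theorem pvRunScan_mem (l : List String) (hp : l.Pairwise (· ≤ ·)) (x : String) :
    x ∈ pvRunScan l ↔ 2 ≤ l.count x := by
  induction l using pvRunScan.induct with
  | case1 => simp [pvRunScan]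
  | case2 a t h ih =>
    rw [pvRunScan, if_pos h]
    have hrest : (t.dropWhile (fun y => y == a)).Pairwise (· ≤ ·) :=
      List.Pairwise.sublist (List.dropWhile_sublist _) ((List.pairwise_cons.mp hp).2)
    by_cases hxa : x = a
    · subst hxa
      -- count x (x :: t) ≥ 2 since t.head? = some x
      match t, h with
      | b :: r, h =>
        have hb : b = x := by simpa using h
        subst hb
        refine iff_of_true (by simp) ?_
        simp
    · simp only [List.mem_cons, hxa, false_or]
      rw [ih hrest, pv_count_drop a x t hxa]
      simp [(Ne.symm hxa : a ≠ x)]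
  | case3 a t h ih =>
    rw [pvRunScan, if_neg h]
    have htp : t.Pairwise (· ≤ ·) := (List.pairwise_cons.mp hp).2
    rw [ih htp]
    by_cases hxa : x = a
    · subst hxa
      have h0 : t.count x = 0 := List.count_eq_zero.mpr (pv_head_not_mem_tail x t hp h)
      simp [h0]
    · simp [(Ne.symm hxa : a ≠ x)]

-- the run scan of a sorted list has no duplicates
theorem pvRunScan_nodup (l : List String) (hp : l.Pairwise (· ≤ ·)) :
    (pvRunScan l).Nodup := by
  induction l using pvRunScan.induct with
  | case1 => simp [pvRunScan]
  | case2 a t h ih =>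
    rw [pvRunScan, if_pos h]
    have hrest : (t.dropWhile (fun y => y == a)).Pairwise (· ≤ ·) :=
      List.Pairwise.sublist (List.dropWhile_sublist _) ((List.pairwise_cons.mp hp).2)
    refine List.nodup_cons.mpr ⟨?_, ih hrest⟩
    intro hmem
    exact pv_head_not_mem_drop a t hp ((pvRunScan_sublist _).subset hmem)
  | case3 a t h ih =>
    rw [pvRunScan, if_neg h]
    exact ih (List.pairwise_cons.mp hp).2

theorem duplicate_ids_py_eq (items : List (List (String × String))) :
    duplicate_ids_py items = duplicate_ids_py_alt items := by
  unfold duplicate_ids_py duplicate_ids_py_alt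
  simp only []
  set ids := items.map (fun item => (PySem.Dict.mk item).getD "id" "") with hids
  have hfold : items.foldl
      (fun (st : PySem.Set String × PySem.Set String) item =>
        let item_id := (PySem.Dict.mk item).getD "id" ""
        let duplicates := if PySem.Set.contains st.1 item_id then PySem.Set.add st.2 item_id else st.2
        (PySem.Set.add st.1 item_id, duplicates))
      (PySem.Set.empty, PySem.Set.empty)
      = ids.foldl pvStep (PySem.Set.empty, PySem.Set.empty) := by
    rw [hids, List.foldl_map]; rfl
  rw [hfold]
  set D := (ids.foldl pvStep (PySem.Set.empty, PySem.Set.empty)).2 with hD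
  set S := PySem.List.sorted ids (fun x => x) false with hS
  have hSp : S.Pairwise (· ≤ ·) := PySem.List.sorted_pairwise ids (fun x => x)
  have hSperm : S.Perm ids := PySem.List.sorted_perm ids (fun x => x) false
  -- left side: sorted of the nodup duplicates set
  have hDn : D.Nodup := pvLoop_snd_nodup ids _ _ List.nodup_nil
  have hDmem : ∀ x, x ∈ D ↔ 2 ≤ ids.count x := by
    intro x
    rw [hD, pvLoop_snd_mem]
    simp [PySem.Set.empty]
  -- right side facts
  have hBn : (pvRunScan S).Nodup := pvRunScan_nodup S hSp
  have hBmem : ∀ x, x ∈ pvRunScan S ↔ 2 ≤ ids.count x := by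
    intro x
    rw [pvRunScan_mem S hSp, hSperm.count_eq]
  set L := PySem.List.sorted D (fun x => x) false with hL
  have hLn : L.Nodup := ((PySem.List.sorted_perm D (fun x => x) false).nodup_iff).mpr hDn
  have hLp : L.Pairwise (· ≤ ·) := PySem.List.sorted_pairwise D (fun x => x)
  have hBp : (pvRunScan S).Pairwise (· ≤ ·) := List.Pairwise.sublist (pvRunScan_sublist S) hSp
  have hperm : L.Perm (pvRunScan S) := by
    rw [List.perm_ext_iff_of_nodup hLn hBn]
    intro x
    rw [hBmem x, hL, PySem.List.mem_sorted, hDmem x]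
  exact PySem.List.eq_of_perm_of_pairwise_le_of_injective (fun x => x)
    (fun _ _ h => h) hperm hLp hBp

-- ===== VERDICT (by name: the statement is the Claim_ definition above) =====
theorem duplicate_ids_py_spec : Claim_equal_duplicate_ids_py := by
  intro items _
  unfold Spec_duplicate_ids_py
  exact duplicate_ids_py_eq items
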